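-- pv_equiv track=rewrite | github.com/davidix/dmux | src/dmux/services/plugin_manager.py | _replace_plugin_option_block_legacy
-- ===== SOURCE A (Python) =====
-- def _replace_plugin_option_block_legacy(
--     fragment: str, spec: str, new_options: list[str]
-- ) -> tuple[str, bool]:
--     """Replace lines after ``set -g @plugin 'spec'`` until the next ``@plugin`` or ``run``."""
--     lines = fragment.splitlines()
--     out: list[str] = []
--     i = 0
--     n = len(lines)
--     needle = f"set -g @plugin '{spec}'"
--     found = False
--     while i < n:
--         line = lines[i]
--         if line.strip() == needle:
--             found = True
--             out.append(line)
--             i += 1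
--             while i < n:
--                 sl = lines[i]
--                 if sl.startswith("set -g @plugin '") or sl.startswith("run '"):
--                     break
--                 i += 1
--             for opt in new_options:
--                 out.append(opt)
--             continue
--         out.append(line)
--         i += 1
--     body = "\n".join(out)
--     if fragment.endswith("\n"):
--         body += "\n"
--     return body, found
-- ===== SOURCE B (Python) =====
-- def _find(lines, start, pred):
--     """Index of the first line at or after ``start`` satisfying ``pred``, else None."""
--     for k in range(start, len(lines)):
--         if pred(lines[k]):
--             return k
--     return None
--
--
-- def _replace_plugin_option_block_legacy(
--     fragment: str, spec: str, new_options: list[str]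
-- ) -> tuple[str, bool]:
--     """Two staged passes: first compute the marker block spans, then splice slices."""
--     lines = fragment.splitlines()
--     needle = f"set -g @plugin '{spec}'"
--
--     def is_stop(l):
--         return l.startswith("set -g @plugin '") or l.startswith("run '")
--
--     # phase 1: spans (marker index, resume index) -- the resume line is re-examined
--     spans = []
--     i = 0
--     while True:
--         m = _find(lines, i, lambda l: l.strip() == needle)
--         if m is None:
--             break
--         r = _find(lines, m + 1, is_stop)
--         if r is None:
--             r = len(lines)
--         spans.append((m, r))
--         i = r
--     # phase 2: rebuild from kept slices, inserting the options after each marker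
--     out = []
--     prev = 0
--     for m, r in spans:
--         out += lines[prev:m + 1]
--         out += new_options
--         prev = r
--     out += lines[prev:]
--     body = "\n".join(out)
--     if fragment.endswith("\n"):
--         body += "\n"
--     return body, bool(spans)
-- ===== Notes on version B (the rewrite author's own statement) =====
-- stated objective: alternative
-- what changed: Replaces A's interleaved scan-and-skip (outer while with an inner skip while that builds the output as it goes) by two staged passes: pass 1 computes the list of (marker, resume) index spans with a find-from-index helper, pass 2 rebuilds the output by concatenating kept slices lines[prev:m+1] and inserting new_options at each span; found = spans nonempty.
import Mathlib
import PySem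

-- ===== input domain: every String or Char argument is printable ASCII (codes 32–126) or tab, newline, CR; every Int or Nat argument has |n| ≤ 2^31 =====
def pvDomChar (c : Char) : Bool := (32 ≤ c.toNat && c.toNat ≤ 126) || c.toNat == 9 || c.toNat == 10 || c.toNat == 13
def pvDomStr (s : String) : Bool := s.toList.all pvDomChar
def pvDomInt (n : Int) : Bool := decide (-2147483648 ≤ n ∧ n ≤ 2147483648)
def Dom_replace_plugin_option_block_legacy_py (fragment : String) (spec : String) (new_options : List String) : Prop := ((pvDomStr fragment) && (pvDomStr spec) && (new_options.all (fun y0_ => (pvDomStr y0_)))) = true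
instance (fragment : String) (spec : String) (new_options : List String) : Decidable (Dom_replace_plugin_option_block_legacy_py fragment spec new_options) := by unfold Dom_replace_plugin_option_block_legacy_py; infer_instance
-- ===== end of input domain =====

-- B replaces A's interleaved scan-and-skip (outer while + inner skip while, building the
-- output as it goes) by two staged passes: compute (marker, resume) index spans first,
-- then splice kept slices with the options inserted (objective: alternative, same O(n)).

-- ===== PORT A =====
-- the stop-line test 'sl.startswith("set -g @plugin '") or sl.startswith("run '")' (shared by both Pythons verbatim)
def pvIsStop (l : String) : Bool :=
  PySem.Str.startswith l "set -g @plugin '" || PySem.Str.startswith l "run '"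

-- A's inner 'while i < n: … break' loop: advance over lines until a stop line (which A re-examines)
def pvSkipA : List String → List String
  | [] => []
  | l :: ls => if pvIsStop l then l :: ls else pvSkipA ls

theorem pvSkipA_length_le : ∀ ls : List String, (pvSkipA ls).length ≤ ls.length
  | [] => le_refl _
  | l :: ls => by
    simp only [pvSkipA]
    split
    · exact le_refl _
    · exact Nat.le_succ_of_le (pvSkipA_length_le ls)

-- A's outer 'while i < n' loop, as structural recursion on the remaining suffix of lines
def pvLoopA (needle : String) (opts : List String) : List String → List String × Bool
  | [] => ([], false)
  | line :: rest =>
    if PySem.Str.strip line == needle then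
      let r := pvLoopA needle opts (pvSkipA rest)
      (line :: (opts ++ r.1), true)
    else
      let r := pvLoopA needle opts rest
      (line :: r.1, r.2)
  termination_by ls => ls.length
  decreasing_by
  · exact Nat.lt_succ_of_le (pvSkipA_length_le rest)
  · simp

def replace_plugin_option_block_legacy_py (fragment : String) (spec : String) (new_options : List String) : String × Bool :=
  let lines := PySem.Str.splitlines fragment
  let needle := "set -g @plugin '" ++ spec ++ "'"
  let r := pvLoopA needle new_options lines
  let body := PySem.Str.join "\n" r.1
  let body := if PySem.Str.endswith fragment "\n" then body ++ "\n" else body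
  (body, r.2)

-- ===== PORT B =====
-- Source B's '_find(lines, start, pred)': index of the first line at/after start satisfying pred,
-- ported as a scan of the suffix 'lines.drop start' (exactly the lines 'range(start, len(lines))'
-- examines) returning a relative index; the absolute index is 'start + d'
def pvFindRel (p : String → Bool) : List String → Option Nat
  | [] => none
  | l :: ls => if p l then some 0 else (pvFindRel p ls).map (· + 1)

theorem pvFindRel_eq_findIdx? (p : String → Bool) :
    ∀ ls : List String, pvFindRel p ls = List.findIdx? p ls
  | [] => rfl
  | l :: ls => by
    simp [pvFindRel, List.findIdx?_cons, pvFindRel_eq_findIdx? p ls]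

-- needed by pvSpans's termination proof
theorem pvFindRel_lt_length {p : String → Bool} {ls : List String} {d : Nat}
    (hm : pvFindRel p ls = some d) : d < ls.length := by
  rw [pvFindRel_eq_findIdx?] at hm
  obtain ⟨h, -, -⟩ := List.findIdx?_eq_some_iff_getElem.mp hm
  exact h

-- phase 1 of Source B: the while loop collecting (marker index, resume index) spans
def pvSpans (needle : String) (lines : List String) (i : Nat) : List (Nat × Nat) :=
  match hm : pvFindRel (fun l => PySem.Str.strip l == needle) (lines.drop i) with
  | none => []
  | some d =>
    (i + d, match pvFindRel pvIsStop (lines.drop (i + d + 1)) with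
            | none => lines.length
            | some e => i + d + 1 + e) ::
      pvSpans needle lines (match pvFindRel pvIsStop (lines.drop (i + d + 1)) with
            | none => lines.length
            | some e => i + d + 1 + e)
  termination_by lines.length - i
  decreasing_by
    split
    · rename_i h0
      have hd := pvFindRel_lt_length hm
      rw [List.length_drop] at hd
      omega
    · rename_i e he
      have hd := pvFindRel_lt_length hm
      rw [List.length_drop] at hd
      have h2 := pvFindRel_lt_length he
      rw [List.length_drop] at h2
      omega

-- phase 2 of Source B: rebuild from kept slices 'lines[prev:m+1]' with the options spliced in
def pvBuild (lines opts : List String) : List (Nat × Nat) → Nat → List String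
  | [], prev => lines.drop prev
  | (m, r) :: rest, prev =>
    (lines.drop prev).take (m + 1 - prev) ++ opts ++ pvBuild lines opts rest r

def replace_plugin_option_block_legacy_py_alt (fragment : String) (spec : String) (new_options : List String) : String × Bool :=
  let lines := PySem.Str.splitlines fragment
  let needle := "set -g @plugin '" ++ spec ++ "'"
  let spans := pvSpans needle lines 0
  let out := pvBuild lines new_options spans 0
  let body := PySem.Str.join "\n" out
  let body := if PySem.Str.endswith fragment "\n" then body ++ "\n" else body
  (body, !spans.isEmpty)

-- ===== PRECONDITION & SPEC =====
def Spec_replace_plugin_option_block_legacy_py (fragment : String) (spec : String) (new_options : List String) (out : String × Bool) : Prop := out = replace_plugin_option_block_legacy_py_alt fragment spec new_options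
instance (fragment : String) (spec : String) (new_options : List String) (out : String × Bool) : Decidable (Spec_replace_plugin_option_block_legacy_py fragment spec new_options out) := by unfold Spec_replace_plugin_option_block_legacy_py; infer_instance

-- ===== CLAIM (what is proved, stated in full; the proofs are below) =====
def Claim_equal_replace_plugin_option_block_legacy_py : Prop := ∀ (fragment : String) (spec : String) (new_options : List String), Dom_replace_plugin_option_block_legacy_py fragment spec new_options → Spec_replace_plugin_option_block_legacy_py fragment spec new_options (replace_plugin_option_block_legacy_py fragment spec new_options)

-- ===== LEMMAS AND PROOFS =====
-- A's loop on a list whose lines are all non-markers: it copies them and finds nothing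
theorem pvLoopA_nomarker (needle : String) (opts : List String) :
    ∀ (ls : List String), (∀ l ∈ ls, (PySem.Str.strip l == needle) = false) →
      pvLoopA needle opts ls = (ls, false) := by
  intro ls
  induction ls with
  | nil => intro _; simp [pvLoopA]
  | cons a ls ih =>
    intro h
    have ha := h a (by simp)
    rw [pvLoopA, if_neg (by simp [ha]), ih (fun l hl => h l (by simp [hl]))]

-- A's loop distributes over a non-marker prefix
theorem pvLoopA_prefix (needle : String) (opts : List String) :
    ∀ (pre ls : List String), (∀ l ∈ pre, (PySem.Str.strip l == needle) = false) →
      pvLoopA needle opts (pre ++ ls) =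
        (pre ++ (pvLoopA needle opts ls).1, (pvLoopA needle opts ls).2) := by
  intro pre
  induction pre with
  | nil => intro ls _; simp
  | cons a pre ih =>
    intro ls h
    have ha := h a (by simp)
    rw [List.cons_append, pvLoopA, if_neg (by simp [ha]),
        ih ls (fun l hl => h l (by simp [hl]))]
    simp

-- A's inner skip loop = dropping to the first stop line (all of ls if there is none)
theorem pvSkipA_eq_find :
    ∀ (ls : List String),
      pvSkipA ls = (match pvFindRel pvIsStop ls with
                    | none => []
                    | some e => ls.drop e) := by
  intro ls
  induction ls with
  | nil => simp [pvSkipA, pvFindRel]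
  | cons a ls ih =>
    by_cases ha : pvIsStop a = true
    · simp [pvSkipA, pvFindRel, ha]
    · have ha' : pvIsStop a = false := by simpa using ha
      simp only [pvSkipA, pvFindRel, ha', if_neg, Bool.false_eq_true, not_false_iff]
      rw [ih]
      cases hh : pvFindRel pvIsStop ls <;> simp

-- main invariant: A's loop on the suffix 'lines.drop i' equals B's staged spans + build
theorem pvMain (needle : String) (opts : List String) (lines : List String) :
    ∀ (k i : Nat), lines.length - i ≤ k →
      pvLoopA needle opts (lines.drop i) =
        (pvBuild lines opts (pvSpans needle lines i) i,
         !(pvSpans needle lines i).isEmpty) := by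
  intro k
  induction k with
  | zero =>
    intro i hi
    have hdrop : lines.drop i = [] := List.drop_eq_nil_of_le (by omega)
    have hnone : pvFindRel (fun l => PySem.Str.strip l == needle) (lines.drop i) = none := by
      rw [hdrop]; rfl
    rw [pvSpans]
    split
    · simp [pvLoopA, pvBuild, hdrop]
    · rename_i d heq
      rw [hnone] at heq
      cases heq
  | succ k ih =>
    intro i hi
    rw [pvSpans]
    split
    · rename_i hm
      rw [pvFindRel_eq_findIdx?] at hm
      have hall := List.findIdx?_eq_none_iff.mp hm
      simp only [pvBuild, List.isEmpty_nil]
      exact pvLoopA_nomarker needle opts _ hall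
    · rename_i d hm
      rw [pvFindRel_eq_findIdx?] at hm
      obtain ⟨hd, hmark, hpre⟩ := List.findIdx?_eq_some_iff_getElem.mp hm
      have hd' : i + d < lines.length := by
        rw [List.length_drop] at hd; omega
      -- the non-marker prefix, element-wise
      have hpre' : ∀ x ∈ (lines.drop i).take d, (PySem.Str.strip x == needle) = false := by
        intro x hx
        obtain ⟨j, hj, rfl⟩ := List.mem_iff_getElem.mp hx
        have hjd : j < d := lt_of_lt_of_le hj (by simp [List.length_take])
        have := hpre j hjd
        simp only [List.getElem_take]
        simpa using this
      -- decompose the suffix at the marker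
      have hdec : lines.drop i =
          (lines.drop i).take d ++ (lines.drop i)[d] :: (lines.drop i).drop (d + 1) := by
        conv_lhs => rw [← List.take_append_drop d (lines.drop i)]
        rw [List.drop_eq_getElem_cons hd]
      have hrest : (lines.drop i).drop (d + 1) = lines.drop (i + d + 1) := by
        rw [List.drop_drop]
        try congr 1
        try omega
      -- the resume index
      set r := (match pvFindRel pvIsStop (lines.drop (i + d + 1)) with
                | none => lines.length
                | some e => i + d + 1 + e) with hr
      have hskip : pvSkipA ((lines.drop i).drop (d + 1)) = lines.drop r := by
        rw [hrest, pvSkipA_eq_find]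
        cases he : pvFindRel pvIsStop (lines.drop (i + d + 1)) with
        | none => rw [hr, he]; simp [List.drop_length]
        | some e => rw [hr, he]; simp [List.drop_drop]
      have hrgt : i < r := by
        have : r = lines.length ∨ ∃ e, r = i + d + 1 + e := by
          rw [hr]
          cases pvFindRel pvIsStop (lines.drop (i + d + 1)) with
          | none => exact Or.inl rfl
          | some e => exact Or.inr ⟨e, rfl⟩
        rcases this with h | ⟨e, h⟩ <;> omega
      have hih := ih r (by omega)
      -- compute A's side
      conv_lhs => rw [hdec]
      rw [pvLoopA_prefix needle opts _ _ hpre',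
          pvLoopA, if_pos (by simpa using hmark), hskip, hih]
      -- B's slice lines[i : i+d+1] relative to drop i
      have hslice : (lines.drop i).take (i + d + 1 - i) =
          (lines.drop i).take d ++ [(lines.drop i)[d]] := by
        have h1 : i + d + 1 - i = d + 1 := by omega
        rw [h1, List.take_add_one]
        congr 1
        simp [List.getElem?_eq_getElem hd]
      simp only [pvBuild, hslice, List.isEmpty_cons, Bool.not_false]
      simp

-- ===== VERDICT (by name: the statement is the Claim_ definition above) =====
theorem replace_plugin_option_block_legacy_py_spec : Claim_equal_replace_plugin_option_block_legacy_py := by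
  intro fragment spec new_options _
  unfold Spec_replace_plugin_option_block_legacy_py
  unfold replace_plugin_option_block_legacy_py replace_plugin_option_block_legacy_py_alt
  have h := pvMain ("set -g @plugin '" ++ spec ++ "'") new_options
    (PySem.Str.splitlines fragment) (PySem.Str.splitlines fragment).length 0 (by omega)
  simp only [List.drop_zero] at h
  simp only [h]
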